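-- pv_equiv track=rewrite | github.com/caueshimoda/auto_lista_adr | AUTO LISTA ADR.py | tc1_menor
-- ===== SOURCE A (Python) =====
-- def tc1_menor(tc1, tc2):
--     # Essa é uma função recursiva que avalia se o primeiro timecode enviado é menor que o segundo.
--     # Para isso, ela pega os dois primeiro caracteres do timecode (que tem formato
--     # 00:00:00:00) e converte para inteiro, comparando ambos.
--     tc1_num = int(tc1[:2])
--     tc2_num = int(tc2[:2])
--     if tc1_num < tc2_num:
--         return True
--     elif tc1_num == tc2_num:
--         # Caso a primeira parte dos dois TCs sejam iguais, e função chama ela mesma para avaliar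
--         # a próxima parte do TC. Para isso ela envia para ela mesma o TC sem os 3 primeiros caracteres,
--         # a não ser que ela já esteja nos últimos 2 caracteres. Nesse caso os TCs são exatamente iguais.
--         if len(tc1) > 2:
--             if tc1_menor(tc1[3:], tc2[3:]):
--                 return True
--     return False
-- ===== SOURCE B (Python) =====
-- def tc1_menor(tc1, tc2):
--     # Index-driven loop: read the 2-char field at position 3*k of each timecode,
--     # decide on the first differing field, stop when tc1 has no further field.
--     n = len(tc1)
--     k = 0
--     while True:
--         a = int(tc1[3*k:3*k+2])
--         b = int(tc2[3*k:3*k+2])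
--         if a != b:
--             return a < b
--         if 3*(k+1) > n:
--             return False
--         k += 1
-- ===== Notes on version B (the rewrite author's own statement) =====
-- stated objective: alternative
-- what changed: A recursively consumes both strings, slicing 3 characters off per call and deciding with a <, ==, len cascade; B keeps the strings whole and runs an index-driven while loop reading the 2-char field at position 3*k, deciding on a single a != b test.
import Mathlib
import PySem

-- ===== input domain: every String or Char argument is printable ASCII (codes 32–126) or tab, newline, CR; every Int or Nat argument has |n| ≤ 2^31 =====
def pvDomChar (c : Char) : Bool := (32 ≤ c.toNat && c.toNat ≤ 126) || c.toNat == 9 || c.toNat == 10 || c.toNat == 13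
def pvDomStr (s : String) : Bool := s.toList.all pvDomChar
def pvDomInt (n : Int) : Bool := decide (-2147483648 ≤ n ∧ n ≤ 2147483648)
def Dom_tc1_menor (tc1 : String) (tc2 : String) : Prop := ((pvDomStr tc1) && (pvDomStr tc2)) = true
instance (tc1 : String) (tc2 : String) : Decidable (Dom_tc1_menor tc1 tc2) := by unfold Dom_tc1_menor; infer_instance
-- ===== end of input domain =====

-- B replaces A's slice-and-recurse cascade with an index-driven while loop over field
-- positions 3*k deciding on a single a != b test ('alternative' objective, same cost).

-- ===== PORT A =====
-- A works on code points; Python slicing tc[:2] / tc[3:] is (·.take 2) / (·.drop 3)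
-- on toList (exact for nonnegative bounds: PySem.List.slice_to_natCast / slice_from_natCast).
def tc1A (l1 : List Char) (l2 : List Char) : Bool :=
  match PySem.Int.ofChars? (l1.take 2), PySem.Int.ofChars? (l2.take 2) with
  | some tc1_num, some tc2_num =>
      if tc1_num < tc2_num then true
      else if tc1_num = tc2_num then
        if 2 < l1.length then
          (if tc1A (l1.drop 3) (l2.drop 3) then true else false)
        else false
      else false
  | _, _ => false   -- int() raised ValueError: excluded by Pre_tc1_menor
termination_by l1.length
decreasing_by simp; omega

def tc1_menor (tc1 : String) (tc2 : String) : Bool := tc1A tc1.toList tc2.toList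

-- ===== PORT B =====
-- the `while True:` loop of Source B, over the loop variable k; Python slicing
-- tc[3*k:3*k+2] is (·.drop (3*k)).take 2 (exact: PySem.List.slice_natCast_add).
def altLoop (l1 : List Char) (l2 : List Char) (k : Nat) : Bool :=
  match PySem.Int.ofChars? ((l1.drop (3 * k)).take 2),
        PySem.Int.ofChars? ((l2.drop (3 * k)).take 2) with
  | some a, some b =>
      if a ≠ b then decide (a < b)
      else if 3 * (k + 1) > l1.length then false
      else altLoop l1 l2 (k + 1)
  | _, _ => false   -- int() raised ValueError: excluded by Pre_tc1_menor
termination_by l1.length - 3 * k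
decreasing_by omega

def tc1_menor_alt (tc1 : String) (tc2 : String) : Bool := altLoop tc1.toList tc2.toList 0

-- ===== PRECONDITION & SPEC =====
-- the 2-char field both programs read at step k
def pvField (l : List Char) (k : Nat) : Option Int :=
  PySem.Int.ofChars? ((l.drop (3 * k)).take 2)

-- Pre_ is exactly the domain of A (and of B): there is a first step k — every earlier
-- field parses in both strings and is equal on both sides, with tc1 long enough to
-- continue — whose fields parse in both strings and either differ or end tc1.
-- It excludes exactly the inputs where int() raises ValueError in both programs.
def Pre_tc1_menor (tc1 : String) (tc2 : String) : Prop :=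
  ∃ k ≤ tc1.toList.length,
    (∀ i < k, 3 * (i + 1) ≤ tc1.toList.length ∧
      ∃ v, pvField tc1.toList i = some v ∧ pvField tc2.toList i = some v) ∧
    (pvField tc1.toList k).isSome = true ∧ (pvField tc2.toList k).isSome = true ∧
    (pvField tc1.toList k ≠ pvField tc2.toList k ∨ 3 * (k + 1) > tc1.toList.length)
instance (tc1 : String) (tc2 : String) : Decidable (Pre_tc1_menor tc1 tc2) := by
  unfold Pre_tc1_menor; infer_instance

def pvWitness_tc1_menor : String × String := ("00:00:01:02", "00:00:01:03")

def Spec_tc1_menor (tc1 : String) (tc2 : String) (out : Bool) : Prop := out = tc1_menor_alt tc1 tc2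
instance (tc1 : String) (tc2 : String) (out : Bool) : Decidable (Spec_tc1_menor tc1 tc2 out) := by
  unfold Spec_tc1_menor; infer_instance

-- ===== CLAIM (what is proved, stated in full; the proofs are below) =====
def Claim_equal_tc1_menor : Prop := ∀ (tc1 : String) (tc2 : String), Dom_tc1_menor tc1 tc2 → Pre_tc1_menor tc1 tc2 → Spec_tc1_menor tc1 tc2 (tc1_menor tc1 tc2)

-- ===== LEMMAS AND PROOFS =====

-- A's call on the k-times-sliced strings is B's loop iteration k (on every input).
lemma tc1_loop_eq (m : Nat) : ∀ (l1 l2 : List Char) (k : Nat), l1.length - 3 * k = m →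
    tc1A (l1.drop (3 * k)) (l2.drop (3 * k)) = altLoop l1 l2 k := by
  induction m using Nat.strong_induction_on with
  | _ m ih =>
    intro l1 l2 k hm
    rw [tc1A, altLoop]
    cases ha : PySem.Int.ofChars? ((l1.drop (3 * k)).take 2) with
    | none => rfl
    | some a =>
      cases hb : PySem.Int.ofChars? ((l2.drop (3 * k)).take 2) with
      | none => rfl
      | some b =>
        by_cases hab : a = b
        · subst hab
          simp only [lt_irrefl, if_false, ne_eq, not_true_eq_false,
            List.length_drop, if_true]
          by_cases hc : 2 < l1.length - 3 * k
          · rw [if_pos hc, if_neg (by omega : ¬ 3 * (k + 1) > l1.length)]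
            have e3 : ∀ (l : List Char), List.drop 3 (List.drop (3 * k) l) = List.drop (3 * (k + 1)) l := by
              intro l; rw [List.drop_drop, show 3 * k + 3 = 3 * (k + 1) from by ring]
            simp only [e3]
            rw [ih (l1.length - 3 * (k + 1)) (by omega) l1 l2 (k + 1) rfl]
            cases altLoop l1 l2 (k + 1) <;> rfl
          · rw [if_neg hc, if_pos (by omega : 3 * (k + 1) > l1.length)]
        · by_cases hlt : a < b
          · simp [hlt, hab]
          · simp [hlt, hab]

theorem tc1_menor_spec : Claim_equal_tc1_menor := by
  intro tc1 tc2 _ _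
  unfold Spec_tc1_menor tc1_menor tc1_menor_alt
  have := tc1_loop_eq tc1.toList.length tc1.toList tc2.toList 0 (by omega)
  simpa using this
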